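-- pv_equiv track=rewrite | github.com/gelareh1985/buglocalization | plugins/org.sidiff.bug.localization.prediction/src/buglocalization/dataset/neo4j_queries.py | subgraph_k
-- ===== SOURCE A (Python) =====
-- from typing import List
--
-- def subgraph_k(k: int, node_id: int, labels_mask: List[str] = None, labels_blacklist: List[str] = None, undirected: bool = False) -> str:
--     """
--     Args:
--         k (int): Hops from the started node (traversed edges).
--         node_id (int): The start node ID
--         labels_mask (str, optional): Finally, filters the subgraph by the given label. Defaults to None.
--         labels_blacklist (str, optional): Node labels that should not be on any path.
--         undirected (bool): True if no relationship direction should be used; False to follow only outgoing relationships.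
--
--     Returns:
--         str: The subgraph nodes, without the start node.
--     """
--     dircetion = '' if undirected else '>'
--     query = 'MATCH p0=(k0)-[e0]-' + dircetion + '(k1) WHERE ID(k0) = ' + str(node_id)
--     query += ' AND ' + by_version_path('k0', 'e0', 'k1')
--     if labels_blacklist is not None:
--         query += ' AND NOT ' + label_match(labels_blacklist, 'k1')
--     query += ' WITH k1, p0'
--
--     for distance in range(1, k):
--         current_path = 'p' + str(distance)
--         current_node = 'k' + str(distance)
--         current_edge = 'e' + str(distance)
--         next_node = 'k' + str(distance + 1)
--
--         query += ' MATCH ' + current_path + '=(' + current_node + ')-[' + current_edge + ']-' + dircetion + '(' + next_node + ')'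
--         query += ' WHERE ' + by_version_path(current_node, current_edge, next_node)
--         if labels_blacklist is not None:
--             query += ' AND NOT ' + label_match(labels_blacklist, next_node)
--         query += ' WITH ' + next_node
--
--         for paths in range(0, distance + 1):
--             query += ', p' + str(paths)
--
--     query += ' WITH NODES(p0)'
--
--     for distance in range(1, k):
--         query += ' + NODES(p' + str(distance) + ')'
--
--     query += ' AS nodes UNWIND nodes AS n'
--
--     # Filter by label:
--     if labels_mask is not None:
--         query += ' WITH n WHERE ' + label_match(labels_mask, 'n')
--
--     query += ' RETURN DISTINCT ID(n) AS index, n AS nodes'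
--     return query
--
-- def label_match(labels: List[str], variable: str):
--     query = ''
--
--     if labels:
--         query += '('
--         for label_idx in range(len(labels)):
--             if (label_idx > 0):
--                 query += ' OR'
--             query += ' "' + labels[label_idx] + '" IN LABELS(' + variable + ')'
--         query += ')'
--
--     return query
--
-- def by_version_path(variableA: str, edge: str, variableB: str) -> str:
--     return by_version(variableA) + ' AND ' + by_version(edge) + ' AND ' + by_version(variableB)
--
-- def by_version(variable: str) -> str:
--     created_in_version = variable + '.__initial__version__ <= $db_version'
--     removed_in_version = variable + '.__last__version__ >= $db_version'
--     existing_in_latest_version = 'NOT EXISTS(' + variable + '.__last__version__)'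
--     return created_in_version + ' AND ' + '(' + removed_in_version + ' OR ' + existing_in_latest_version + ')'
-- ===== SOURCE B (Python) =====
-- from typing import List
--
-- def subgraph_k(k: int, node_id: int, labels_mask: List[str] = None, labels_blacklist: List[str] = None, undirected: bool = False) -> str:
--     arrow = '' if undirected else '>'
--
--     def ver(v):
--         return (v + '.__initial__version__ <= $db_version AND (' + v
--                 + '.__last__version__ >= $db_version OR NOT EXISTS(' + v + '.__last__version__))')
--
--     def lmatch(labels, var):
--         if not labels:
--             return ''
--         return '(' + ' OR'.join(' "' + l + '" IN LABELS(' + var + ')' for l in labels) + ')'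
--
--     def blk(var):
--         return '' if labels_blacklist is None else ' AND NOT ' + lmatch(labels_blacklist, var)
--
--     query = ('MATCH p0=(k0)-[e0]-' + arrow + '(k1) WHERE ID(k0) = ' + str(node_id)
--              + ' AND ' + ver('k0') + ' AND ' + ver('e0') + ' AND ' + ver('k1')
--              + blk('k1') + ' WITH k1, p0')
--     withs = 'p0'             # comma-separated path variables accumulated so far
--     nodes_sum = 'NODES(p0)'  # 'NODES(p0) + NODES(p1) + ...' accumulated so far
--     d = 1
--     while d < k:
--         p, a, e, b = 'p' + str(d), 'k' + str(d), 'e' + str(d), 'k' + str(d + 1)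
--         withs += ', ' + p
--         query += (' MATCH ' + p + '=(' + a + ')-[' + e + ']-' + arrow + '(' + b + ')'
--                   + ' WHERE ' + ver(a) + ' AND ' + ver(e) + ' AND ' + ver(b)
--                   + blk(b) + ' WITH ' + b + ', ' + withs)
--         nodes_sum += ' + NODES(' + p + ')'
--         d += 1
--     query += ' WITH ' + nodes_sum + ' AS nodes UNWIND nodes AS n'
--     if labels_mask is not None:
--         query += ' WITH n WHERE ' + lmatch(labels_mask, 'n')
--     return query + ' RETURN DISTINCT ID(n) AS index, n AS nodes'
-- ===== Notes on version B (the rewrite author's own statement) =====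
-- stated objective: simpler
-- what changed: A's nested inner rescan (re-emitting p0..pd each hop) and its second independent range loop over NODES(p_i) are both removed: B runs one loop that incrementally maintains two accumulator strings (the comma-separated WITH list and the 'NODES(p0) + ...' sum), extending each by one item per hop and emitting them directly.
import Mathlib
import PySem

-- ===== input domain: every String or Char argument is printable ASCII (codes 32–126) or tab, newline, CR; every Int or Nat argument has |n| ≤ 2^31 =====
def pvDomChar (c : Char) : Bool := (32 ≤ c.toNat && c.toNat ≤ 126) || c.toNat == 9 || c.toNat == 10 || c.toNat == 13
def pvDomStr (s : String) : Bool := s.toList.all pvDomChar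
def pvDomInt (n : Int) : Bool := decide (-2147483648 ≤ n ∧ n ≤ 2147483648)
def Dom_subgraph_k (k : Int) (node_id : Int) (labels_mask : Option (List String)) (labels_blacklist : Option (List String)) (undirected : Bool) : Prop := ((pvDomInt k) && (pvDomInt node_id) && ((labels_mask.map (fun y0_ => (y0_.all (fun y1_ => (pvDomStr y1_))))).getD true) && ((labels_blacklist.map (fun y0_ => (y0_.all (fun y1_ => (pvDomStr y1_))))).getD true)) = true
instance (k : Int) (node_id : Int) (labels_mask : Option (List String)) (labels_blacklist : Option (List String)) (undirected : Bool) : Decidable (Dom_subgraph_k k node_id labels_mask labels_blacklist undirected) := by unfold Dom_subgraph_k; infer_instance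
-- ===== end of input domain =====

-- B replaces A's nested inner rescan over range(0,distance+1) and A's second range loop by a single
-- loop that incrementally maintains the WITH-list string and the NODES(...)-sum string; same output.

-- ===== PORT A =====
def by_version (var : String) : String :=
  let created_in_version := var ++ ".__initial__version__ <= $db_version"
  let removed_in_version := var ++ ".__last__version__ >= $db_version"
  let existing_in_latest_version := "NOT EXISTS(" ++ var ++ ".__last__version__)"
  created_in_version ++ " AND " ++ "(" ++ removed_in_version ++ " OR " ++ existing_in_latest_version ++ ")"

def by_version_path (variableA : String) (edge : String) (variableB : String) : String :=
  by_version variableA ++ " AND " ++ by_version edge ++ " AND " ++ by_version variableB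

def label_match (labels : List String) (var : String) : String :=
  let query := ""
  if labels.isEmpty then query
  else
    let query := query ++ "("
    let query := (PySem.List.pyRange 0 (PySem.List.len labels)).foldl
      (fun query label_idx =>
        let query := if 0 < label_idx then query ++ " OR" else query
        query ++ " \"" ++ PySem.List.pyGetD labels label_idx "" ++ "\" IN LABELS(" ++ var ++ ")")
      query
    query ++ ")"

def subgraph_k (k : Int) (node_id : Int) (labels_mask : Option (List String)) (labels_blacklist : Option (List String)) (undirected : Bool) : String :=
  let direction := if undirected then "" else ">"
  let query := "MATCH p0=(k0)-[e0]-" ++ direction ++ "(k1) WHERE ID(k0) = " ++ PySem.Int.toStr node_id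
  let query := query ++ " AND " ++ by_version_path "k0" "e0" "k1"
  let query := match labels_blacklist with
    | some bl => query ++ " AND NOT " ++ label_match bl "k1"
    | none => query
  let query := query ++ " WITH k1, p0"
  let query := (PySem.List.pyRange 1 k).foldl
    (fun query distance =>
      let current_path := "p" ++ PySem.Int.toStr distance
      let current_node := "k" ++ PySem.Int.toStr distance
      let current_edge := "e" ++ PySem.Int.toStr distance
      let next_node := "k" ++ PySem.Int.toStr (distance + 1)
      let query := query ++ " MATCH " ++ current_path ++ "=(" ++ current_node ++ ")-[" ++ current_edge ++ "]-" ++ direction ++ "(" ++ next_node ++ ")"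
      let query := query ++ " WHERE " ++ by_version_path current_node current_edge next_node
      let query := match labels_blacklist with
        | some bl => query ++ " AND NOT " ++ label_match bl next_node
        | none => query
      let query := query ++ " WITH " ++ next_node
      (PySem.List.pyRange 0 (distance + 1)).foldl
        (fun query paths => query ++ ", p" ++ PySem.Int.toStr paths) query)
    query
  let query := query ++ " WITH NODES(p0)"
  let query := (PySem.List.pyRange 1 k).foldl
    (fun query distance => query ++ " + NODES(p" ++ PySem.Int.toStr distance ++ ")") query
  let query := query ++ " AS nodes UNWIND nodes AS n"
  let query := match labels_mask with
    | some m => query ++ " WITH n WHERE " ++ label_match m "n"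
    | none => query
  query ++ " RETURN DISTINCT ID(n) AS index, n AS nodes"

-- ===== PORT B =====
-- Python's sep.join(parts), exact
def pyJoin (sep : String) : List String → String
  | [] => ""
  | [a] => a
  | a :: b :: rest => a ++ sep ++ pyJoin sep (b :: rest)

def bver (v : String) : String :=
  v ++ ".__initial__version__ <= $db_version AND (" ++ v ++ ".__last__version__ >= $db_version OR NOT EXISTS(" ++ v ++ ".__last__version__))"

def blmatch (labels : List String) (v : String) : String :=
  if labels.isEmpty then ""
  else "(" ++ pyJoin " OR" (labels.map (fun l => " \"" ++ l ++ "\" IN LABELS(" ++ v ++ ")")) ++ ")"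

-- Source B's while loop: one pass, threading (query, withs, nodes_sum)
def altLoop (arrow : String) (lb : Option (List String)) (k : Int) (d : Int) (query : String) (withs : String) (nodes_sum : String) : String × String :=
  if h : d < k then
    let p := "p" ++ PySem.Int.toStr d
    let a := "k" ++ PySem.Int.toStr d
    let e := "e" ++ PySem.Int.toStr d
    let b := "k" ++ PySem.Int.toStr (d + 1)
    let withs := withs ++ ", " ++ p
    let query := query ++ " MATCH " ++ p ++ "=(" ++ a ++ ")-[" ++ e ++ "]-" ++ arrow ++ "(" ++ b ++ ")" ++ " WHERE " ++ bver a ++ " AND " ++ bver e ++ " AND " ++ bver b ++ (match lb with | none => "" | some bls => " AND NOT " ++ blmatch bls b) ++ " WITH " ++ b ++ ", " ++ withs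
    altLoop arrow lb k (d + 1) query withs (nodes_sum ++ " + NODES(" ++ p ++ ")")
  else (query, nodes_sum)
termination_by (k - d).toNat
decreasing_by omega

def subgraph_k_alt (k : Int) (node_id : Int) (labels_mask : Option (List String)) (labels_blacklist : Option (List String)) (undirected : Bool) : String :=
  let arrow := if undirected then "" else ">"
  let blk := fun (v : String) => match labels_blacklist with
    | none => ""
    | some bls => " AND NOT " ++ blmatch bls v
  let query := "MATCH p0=(k0)-[e0]-" ++ arrow ++ "(k1) WHERE ID(k0) = " ++ PySem.Int.toStr node_id ++ " AND " ++ bver "k0" ++ " AND " ++ bver "e0" ++ " AND " ++ bver "k1" ++ blk "k1" ++ " WITH k1, p0"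
  let st := altLoop arrow labels_blacklist k 1 query "p0" "NODES(p0)"
  let query := st.1 ++ " WITH " ++ st.2 ++ " AS nodes UNWIND nodes AS n"
  let query := match labels_mask with
    | none => query
    | some m => query ++ " WITH n WHERE " ++ blmatch m "n"
  query ++ " RETURN DISTINCT ID(n) AS index, n AS nodes"

-- ===== PRECONDITION & SPEC =====
def Spec_subgraph_k (k : Int) (node_id : Int) (labels_mask : Option (List String)) (labels_blacklist : Option (List String)) (undirected : Bool) (out : String) : Prop := out = subgraph_k_alt k node_id labels_mask labels_blacklist undirected
instance (k : Int) (node_id : Int) (labels_mask : Option (List String)) (labels_blacklist : Option (List String)) (undirected : Bool) (out : String) : Decidable (Spec_subgraph_k k node_id labels_mask labels_blacklist undirected out) := by unfold Spec_subgraph_k; infer_instance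

-- ===== CLAIM (what is proved, stated in full; the proofs are below) =====
def Claim_equal_subgraph_k : Prop := ∀ (k : Int) (node_id : Int) (labels_mask : Option (List String)) (labels_blacklist : Option (List String)) (undirected : Bool), Dom_subgraph_k k node_id labels_mask labels_blacklist undirected → Spec_subgraph_k k node_id labels_mask labels_blacklist undirected (subgraph_k k node_id labels_mask labels_blacklist undirected)

-- ===== LEMMAS AND PROOFS =====

theorem bv_eq (v : String) : by_version v = bver v := by
  unfold by_version bver
  apply String.toList_inj.mp
  simp [String.toList_append]

theorem bvp_eq (a e b : String) : by_version_path a e b = bver a ++ " AND " ++ bver e ++ " AND " ++ bver b := by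
  simp [by_version_path, bv_eq]

theorem pyJoin_nil_cons (a : String) (l : List String) :
    pyJoin "" (a :: l) = a ++ pyJoin "" l := by
  cases l with
  | nil => simp [pyJoin]
  | cons b t => simp [pyJoin]

theorem pyJoin_append_last (sep x : String) (l : List String) (h : l ≠ []) :
    pyJoin sep (l ++ [x]) = pyJoin sep l ++ sep ++ x := by
  induction l with
  | nil => exact absurd rfl h
  | cons a t ih =>
    cases t with
    | nil => simp [pyJoin]
    | cons b r =>
      have := ih (by simp)
      simp only [List.cons_append] at *
      rw [show pyJoin sep (a :: b :: (r ++ [x])) = a ++ sep ++ pyJoin sep (b :: (r ++ [x])) from rfl]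
      rw [this]
      rw [show pyJoin sep (a :: b :: r) = a ++ sep ++ pyJoin sep (b :: r) from rfl]
      simp [String.append_assoc]

theorem foldl_app_str {α : Type} (l : List α) (f : α → String) (q : String) :
    l.foldl (fun q x => q ++ f x) q = q ++ pyJoin "" (l.map f) := by
  induction l generalizing q with
  | nil => simp [pyJoin]
  | cons a t ih => simp [List.foldl_cons, ih, pyJoin_nil_cons, String.append_assoc]

theorem pyJoin_cons_join {α : Type} (sep : String) (f : α → String) (x : α) (l : List α) :
    pyJoin sep ((x :: l).map f) = f x ++ pyJoin "" (l.map (fun a => sep ++ f a)) := by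
  induction l generalizing x with
  | nil => simp [pyJoin]
  | cons b t ih =>
    simp only [List.map_cons] at *
    rw [show pyJoin sep (f x :: f b :: List.map f t) = f x ++ sep ++ pyJoin sep (f b :: List.map f t) from rfl]
    rw [ih b]
    simp [pyJoin_nil_cons, String.append_assoc]

def pnames (m : Int) : List String :=
  (PySem.List.pyRange 0 m).map (fun i => "p" ++ PySem.Int.toStr i)

theorem pnames_succ (m : Int) (h : 0 ≤ m) :
    pnames (m + 1) = pnames m ++ ["p" ++ PySem.Int.toStr m] := by
  simp [pnames, PySem.List.pyRange_one_succ_right h]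

theorem pnames_one : pnames 1 = ["p0"] := by
  have h : PySem.List.pyRange 0 1 = [0] := by
    simpa using PySem.List.pyRange_one_cons (a := 0) (b := 1) (by norm_num)
  simp only [pnames, h, List.map_cons, List.map_nil]
  rfl

theorem pnames_ne_nil (m : Int) (hm : 1 ≤ m) : pnames m ≠ [] := by
  have h : PySem.List.pyRange 0 m = 0 :: PySem.List.pyRange 1 m :=
    by simpa using PySem.List.pyRange_one_cons (a := 0) (b := m) (by omega)
  simp [pnames, h]

theorem label_eq (labels : List String) (v : String) :
    label_match labels v = blmatch labels v := by
  cases labels with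
  | nil => simp [label_match, blmatch]
  | cons x rest =>
    have hfun : (fun (query : String) (label_idx : Int) =>
        (if 0 < label_idx then query ++ " OR" else query) ++ " \"" ++
          PySem.List.pyGetD (x :: rest) label_idx "" ++ "\" IN LABELS(" ++ v ++ ")")
        = (fun (query : String) (label_idx : Int) => query ++
            ((if 0 < label_idx then " OR" else "") ++
              (" \"" ++ PySem.List.pyGetD (x :: rest) label_idx "" ++ "\" IN LABELS(" ++ v ++ ")"))) := by
      funext q i
      split_ifs <;> (apply String.toList_inj.mp; simp [String.toList_append])
    have hlen : (0:Int) < PySem.List.len (x :: rest) := by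
      simp [PySem.List.len_eq]
    have hrange : PySem.List.pyRange 0 (PySem.List.len (x :: rest))
        = 0 :: PySem.List.pyRange 1 (PySem.List.len (x :: rest)) := by
      simpa using PySem.List.pyRange_one_cons hlen
    have htail : (PySem.List.pyRange 1 (PySem.List.len (x :: rest))).map
        (fun i => (if 0 < i then " OR" else "") ++
          (" \"" ++ PySem.List.pyGetD (x :: rest) i "" ++ "\" IN LABELS(" ++ v ++ ")"))
        = rest.map (fun a => " OR" ++ (" \"" ++ a ++ "\" IN LABELS(" ++ v ++ ")")) := by
      have h1 : (PySem.List.pyRange 1 (PySem.List.len (x :: rest))).map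
          (fun i => (if 0 < i then " OR" else "") ++
            (" \"" ++ PySem.List.pyGetD (x :: rest) i "" ++ "\" IN LABELS(" ++ v ++ ")"))
          = (PySem.List.pyRange 1 (PySem.List.len (x :: rest))).map
            ((fun s => " OR" ++ (" \"" ++ s ++ "\" IN LABELS(" ++ v ++ ")")) ∘
              (fun j => PySem.List.pyGetD (x :: rest) j "")) := by
        apply List.map_congr_left
        intro i hi
        have hge := (PySem.List.mem_pyRange_one.mp hi).1
        have hpos : (0:Int) < i := by omega
        simp [hpos]
      rw [h1, ← List.map_map]
      rw [PySem.List.map_pyGetD_pyRange (x :: rest) "" (a := 1) (by norm_num)]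
      simp
    have hget0 : PySem.List.pyGetD (x :: rest) 0 "" = x := by
      simp [PySem.List.pyGetD, PySem.List.pyGet?, PySem.List.pyIdx?]
    simp only [label_match, blmatch, List.isEmpty_cons, Bool.false_eq_true, if_false]
    rw [hfun, foldl_app_str, hrange, List.map_cons, htail, hget0]
    rw [pyJoin_cons_join (sep := " OR") (f := fun l => " \"" ++ l ++ "\" IN LABELS(" ++ v ++ ")") x rest]
    rw [pyJoin_nil_cons]
    apply String.toList_inj.mp
    simp [String.toList_append]

theorem inner_join (d : Int) (hd : 0 ≤ d) :
    pyJoin "" ((PySem.List.pyRange 0 (d + 1)).map (fun i => ", p" ++ PySem.Int.toStr i))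
      = ", " ++ pyJoin ", " (pnames (d + 1)) := by
  have hr : PySem.List.pyRange 0 (d + 1) = 0 :: PySem.List.pyRange 1 (d + 1) := by
    simpa using PySem.List.pyRange_one_cons (a := 0) (b := d + 1) (by omega)
  have hf : (fun (i : Int) => ", p" ++ PySem.Int.toStr i)
      = fun i => ", " ++ ("p" ++ PySem.Int.toStr i) := by
    funext i
    apply String.toList_inj.mp
    simp [String.toList_append]
  rw [hf, pnames, hr, List.map_cons]
  rw [pyJoin_cons_join (sep := ", ") (f := fun i => "p" ++ PySem.Int.toStr i)]
  rw [pyJoin_nil_cons]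
  apply String.toList_inj.mp
  simp [String.toList_append]

theorem final_join (m : Int) (hm : 1 ≤ m) :
    "NODES(p0)" ++ pyJoin "" ((PySem.List.pyRange 1 m).map
        (fun d => " + NODES(p" ++ PySem.Int.toStr d ++ ")"))
      = pyJoin " + " ((pnames m).map (fun p => "NODES(" ++ p ++ ")")) := by
  have hr : PySem.List.pyRange 0 m = 0 :: PySem.List.pyRange 1 m := by
    simpa using PySem.List.pyRange_one_cons (a := 0) (b := m) (by omega)
  have hA : (fun (d : Int) => " + NODES(p" ++ PySem.Int.toStr d ++ ")")
      = fun a => " + " ++ ("NODES(" ++ ("p" ++ PySem.Int.toStr a) ++ ")") := by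
    funext a
    apply String.toList_inj.mp
    simp [String.toList_append]
  rw [hA, pnames, hr, List.map_map]
  rw [show ((fun p => "NODES(" ++ p ++ ")") ∘ fun i => "p" ++ PySem.Int.toStr i)
      = fun i => "NODES(" ++ ("p" ++ PySem.Int.toStr i) ++ ")" from rfl]
  rw [pyJoin_cons_join (sep := " + ") (f := fun i => "NODES(" ++ ("p" ++ PySem.Int.toStr i) ++ ")")]
  apply String.toList_inj.mp
  simp [String.toList_append]
  rfl

theorem wsucc (m : Int) (hm : 1 ≤ m) :
    pyJoin ", " (pnames m) ++ ", " ++ ("p" ++ PySem.Int.toStr m) = pyJoin ", " (pnames (m + 1)) := by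
  rw [pnames_succ m (by omega), pyJoin_append_last _ _ _ (pnames_ne_nil m hm)]

theorem nsucc (m : Int) (hm : 1 ≤ m) :
    pyJoin " + " ((pnames m).map (fun p => "NODES(" ++ p ++ ")")) ++ " + NODES(" ++ ("p" ++ PySem.Int.toStr m) ++ ")"
      = pyJoin " + " ((pnames (m + 1)).map (fun p => "NODES(" ++ p ++ ")")) := by
  rw [pnames_succ m (by omega), List.map_append, List.map_cons, List.map_nil]
  rw [pyJoin_append_last _ _ _ (by simp [pnames_ne_nil m hm])]
  apply String.toList_inj.mp
  simp [String.toList_append]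

theorem altLoop_stop (arrow : String) (lb : Option (List String)) (k d : Int) (q w ns : String)
    (h : ¬ d < k) : altLoop arrow lb k d q w ns = (q, ns) := by
  rw [altLoop]
  simp [h]

theorem step_eq (arrow : String) (lbv : Option (List String)) (q : String) (m : Int) (hm : 1 ≤ m) :
    (let current_path := "p" ++ PySem.Int.toStr m
     let current_node := "k" ++ PySem.Int.toStr m
     let current_edge := "e" ++ PySem.Int.toStr m
     let next_node := "k" ++ PySem.Int.toStr (m + 1)
     let query := q ++ " MATCH " ++ current_path ++ "=(" ++ current_node ++ ")-[" ++ current_edge ++ "]-" ++ arrow ++ "(" ++ next_node ++ ")"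
     let query := query ++ " WHERE " ++ by_version_path current_node current_edge next_node
     let query := match lbv with
       | some bl => query ++ " AND NOT " ++ label_match bl next_node
       | none => query
     let query := query ++ " WITH " ++ next_node
     (PySem.List.pyRange 0 (m + 1)).foldl
       (fun query paths => query ++ ", p" ++ PySem.Int.toStr paths) query)
    = q ++ " MATCH " ++ ("p" ++ PySem.Int.toStr m) ++ "=(" ++ ("k" ++ PySem.Int.toStr m) ++ ")-[" ++ ("e" ++ PySem.Int.toStr m) ++ "]-" ++ arrow ++ "(" ++ ("k" ++ PySem.Int.toStr (m + 1)) ++ ")" ++ " WHERE " ++ bver ("k" ++ PySem.Int.toStr m) ++ " AND " ++ bver ("e" ++ PySem.Int.toStr m) ++ " AND " ++ bver ("k" ++ PySem.Int.toStr (m + 1)) ++ (match lbv with | none => "" | some bls => " AND NOT " ++ blmatch bls ("k" ++ PySem.Int.toStr (m + 1))) ++ " WITH " ++ ("k" ++ PySem.Int.toStr (m + 1)) ++ ", " ++ (pyJoin ", " (pnames m) ++ ", " ++ ("p" ++ PySem.Int.toStr m)) := by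
  simp only []
  have hf : (fun (query : String) (paths : Int) => query ++ ", p" ++ PySem.Int.toStr paths)
      = fun query paths => query ++ (", p" ++ PySem.Int.toStr paths) := by
    funext a b
    exact String.append_assoc
  rw [hf, foldl_app_str, inner_join m (by omega), ← wsucc m hm, bvp_eq]
  cases lbv with
  | none =>
    apply String.toList_inj.mp
    simp [String.toList_append]
  | some bl =>
    dsimp only
    rw [label_eq]
    apply String.toList_inj.mp
    simp [String.toList_append]

set_option maxHeartbeats 1000000 in
theorem alt_inv (arrow : String) (lbv : Option (List String)) (n : Nat) :
    ∀ (m : Int), 1 ≤ m → ∀ (q : String),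
    altLoop arrow lbv (m + n) m q (pyJoin ", " (pnames m))
        (pyJoin " + " ((pnames m).map (fun p => "NODES(" ++ p ++ ")")))
      = ((PySem.List.pyRange m (m + n)).foldl
          (fun query distance =>
            let current_path := "p" ++ PySem.Int.toStr distance
            let current_node := "k" ++ PySem.Int.toStr distance
            let current_edge := "e" ++ PySem.Int.toStr distance
            let next_node := "k" ++ PySem.Int.toStr (distance + 1)
            let query := query ++ " MATCH " ++ current_path ++ "=(" ++ current_node ++ ")-[" ++ current_edge ++ "]-" ++ arrow ++ "(" ++ next_node ++ ")"
            let query := query ++ " WHERE " ++ by_version_path current_node current_edge next_node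
            let query := match lbv with
              | some bl => query ++ " AND NOT " ++ label_match bl next_node
              | none => query
            let query := query ++ " WITH " ++ next_node
            (PySem.List.pyRange 0 (distance + 1)).foldl
              (fun query paths => query ++ ", p" ++ PySem.Int.toStr paths) query) q,
         pyJoin " + " ((pnames (m + n)).map (fun p => "NODES(" ++ p ++ ")"))) := by
  induction n with
  | zero =>
    intro m hm q
    have hnil : PySem.List.pyRange m (m + (0:Nat)) = [] :=
      PySem.List.pyRange_one_eq_nil (by simp)
    rw [hnil]
    rw [altLoop_stop _ _ _ _ _ _ _ (by simp)]
    simp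
  | succ n ih =>
    intro m hm q
    have hb : m + (((n:Nat) + 1 : Nat) : Int) = (m + 1) + (n : Nat) := by push_cast; omega
    have hlt : m < (m + 1) + (n : Nat) := by omega
    rw [hb]
    rw [altLoop]
    rw [dif_pos hlt]
    have hcons : PySem.List.pyRange m ((m + 1) + (n:Nat)) = m :: PySem.List.pyRange (m + 1) ((m + 1) + (n:Nat)) :=
      PySem.List.pyRange_one_cons hlt
    rw [hcons, List.foldl_cons]
    dsimp only
    rw [← step_eq arrow lbv q m hm]
    rw [wsucc m hm, nsucc m hm]
    exact ih (m + 1) (by omega) _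

set_option maxHeartbeats 1000000 in
theorem core_some (arrow : String) (bl : List String) (node_id : Int) (k : Int) :
    List.foldl (fun query distance => query ++ " + NODES(p" ++ PySem.Int.toStr distance ++ ")")
      (List.foldl
        (fun query distance =>
        List.foldl (fun query paths => query ++ ", p" ++ PySem.Int.toStr paths)
          (query ++ " MATCH " ++ ("p" ++ PySem.Int.toStr distance) ++ "=(" ++ ("k" ++ PySem.Int.toStr distance) ++ ")-[" ++ ("e" ++ PySem.Int.toStr distance) ++ "]-" ++ arrow ++ "(" ++ ("k" ++ PySem.Int.toStr (distance + 1)) ++ ")" ++ " WHERE " ++ by_version_path ("k" ++ PySem.Int.toStr distance) ("e" ++ PySem.Int.toStr distance) ("k" ++ PySem.Int.toStr (distance + 1)) ++ " AND NOT " ++ label_match bl ("k" ++ PySem.Int.toStr (distance + 1)) ++ " WITH " ++ ("k" ++ PySem.Int.toStr (distance + 1)))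
          (PySem.List.pyRange 0 (distance + 1)))
        ("MATCH p0=(k0)-[e0]-" ++ arrow ++ "(k1) WHERE ID(k0) = " ++ PySem.Int.toStr node_id ++ " AND " ++ by_version_path "k0" "e0" "k1" ++ " AND NOT " ++ label_match bl "k1" ++ " WITH k1, p0")
        (PySem.List.pyRange 1 k) ++ " WITH NODES(p0)")
      (PySem.List.pyRange 1 k) ++ " AS nodes UNWIND nodes AS n"
    = (altLoop arrow (some bl) k 1 ("MATCH p0=(k0)-[e0]-" ++ arrow ++ "(k1) WHERE ID(k0) = " ++ PySem.Int.toStr node_id ++ " AND " ++ bver "k0" ++ " AND " ++ bver "e0" ++ " AND " ++ bver "k1" ++ (" AND NOT " ++ blmatch bl "k1") ++ " WITH k1, p0") "p0" "NODES(p0)").1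
      ++ " WITH "
      ++ (altLoop arrow (some bl) k 1 ("MATCH p0=(k0)-[e0]-" ++ arrow ++ "(k1) WHERE ID(k0) = " ++ PySem.Int.toStr node_id ++ " AND " ++ bver "k0" ++ " AND " ++ bver "e0" ++ " AND " ++ bver "k1" ++ (" AND NOT " ++ blmatch bl "k1") ++ " WITH k1, p0") "p0" "NODES(p0)").2
      ++ " AS nodes UNWIND nodes AS n" := by
  have hh : ("MATCH p0=(k0)-[e0]-" ++ arrow ++ "(k1) WHERE ID(k0) = " ++ PySem.Int.toStr node_id ++ " AND " ++ by_version_path "k0" "e0" "k1" ++ " AND NOT " ++ label_match bl "k1" ++ " WITH k1, p0")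
      = ("MATCH p0=(k0)-[e0]-" ++ arrow ++ "(k1) WHERE ID(k0) = " ++ PySem.Int.toStr node_id ++ " AND " ++ bver "k0" ++ " AND " ++ bver "e0" ++ " AND " ++ bver "k1" ++ (" AND NOT " ++ blmatch bl "k1") ++ " WITH k1, p0") := by
    simp only [bvp_eq, label_eq]
    apply String.toList_inj.mp
    simp [String.toList_append]
  have hfN : (fun (query : String) (distance : Int) => query ++ " + NODES(p" ++ PySem.Int.toStr distance ++ ")")
      = fun query distance => query ++ (" + NODES(p" ++ PySem.Int.toStr distance ++ ")") := by
    funext a b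
    apply String.toList_inj.mp
    simp [String.toList_append]
  have e1 : pyJoin ", " (pnames 1) = "p0" := by rw [pnames_one]; rfl
  have e2 : pyJoin " + " ((pnames 1).map (fun p => "NODES(" ++ p ++ ")")) = "NODES(p0)" := by
    rw [pnames_one]; rfl
  by_cases hk : k ≤ 1
  · rw [PySem.List.pyRange_one_eq_nil hk]
    simp only [List.foldl_nil]
    rw [altLoop_stop _ _ _ _ _ _ _ (by omega)]
    dsimp only
    simp only [bvp_eq, label_eq]
    apply String.toList_inj.mp
    simp [String.toList_append]
  · have hk2 : k = 1 + (((k - 1).toNat : Int)) := by omega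
    rw [hh, hk2]
    rw [← e1, ← e2]
    have key := alt_inv arrow (some bl) ((k - 1).toNat) 1 (le_refl 1)
      ("MATCH p0=(k0)-[e0]-" ++ arrow ++ "(k1) WHERE ID(k0) = " ++ PySem.Int.toStr node_id ++ " AND " ++ bver "k0" ++ " AND " ++ bver "e0" ++ " AND " ++ bver "k1" ++ (" AND NOT " ++ blmatch bl "k1") ++ " WITH k1, p0")
    dsimp only at key
    rw [key]
    dsimp only
    rw [hfN, foldl_app_str, ← final_join (1 + (((k - 1).toNat : Int))) (by omega)]
    apply String.toList_inj.mp
    simp [String.toList_append]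

set_option maxHeartbeats 1000000 in
theorem core_none (arrow : String) (node_id : Int) (k : Int) :
    List.foldl (fun query distance => query ++ " + NODES(p" ++ PySem.Int.toStr distance ++ ")")
      (List.foldl
        (fun query distance =>
        List.foldl (fun query paths => query ++ ", p" ++ PySem.Int.toStr paths)
          (query ++ " MATCH " ++ ("p" ++ PySem.Int.toStr distance) ++ "=(" ++ ("k" ++ PySem.Int.toStr distance) ++ ")-[" ++ ("e" ++ PySem.Int.toStr distance) ++ "]-" ++ arrow ++ "(" ++ ("k" ++ PySem.Int.toStr (distance + 1)) ++ ")" ++ " WHERE " ++ by_version_path ("k" ++ PySem.Int.toStr distance) ("e" ++ PySem.Int.toStr distance) ("k" ++ PySem.Int.toStr (distance + 1)) ++ " WITH " ++ ("k" ++ PySem.Int.toStr (distance + 1)))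
          (PySem.List.pyRange 0 (distance + 1)))
        ("MATCH p0=(k0)-[e0]-" ++ arrow ++ "(k1) WHERE ID(k0) = " ++ PySem.Int.toStr node_id ++ " AND " ++ by_version_path "k0" "e0" "k1" ++ " WITH k1, p0")
        (PySem.List.pyRange 1 k) ++ " WITH NODES(p0)")
      (PySem.List.pyRange 1 k) ++ " AS nodes UNWIND nodes AS n"
    = (altLoop arrow none k 1 ("MATCH p0=(k0)-[e0]-" ++ arrow ++ "(k1) WHERE ID(k0) = " ++ PySem.Int.toStr node_id ++ " AND " ++ bver "k0" ++ " AND " ++ bver "e0" ++ " AND " ++ bver "k1" ++ "" ++ " WITH k1, p0") "p0" "NODES(p0)").1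
      ++ " WITH "
      ++ (altLoop arrow none k 1 ("MATCH p0=(k0)-[e0]-" ++ arrow ++ "(k1) WHERE ID(k0) = " ++ PySem.Int.toStr node_id ++ " AND " ++ bver "k0" ++ " AND " ++ bver "e0" ++ " AND " ++ bver "k1" ++ "" ++ " WITH k1, p0") "p0" "NODES(p0)").2
      ++ " AS nodes UNWIND nodes AS n" := by
  have hh : ("MATCH p0=(k0)-[e0]-" ++ arrow ++ "(k1) WHERE ID(k0) = " ++ PySem.Int.toStr node_id ++ " AND " ++ by_version_path "k0" "e0" "k1" ++ " WITH k1, p0")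
      = ("MATCH p0=(k0)-[e0]-" ++ arrow ++ "(k1) WHERE ID(k0) = " ++ PySem.Int.toStr node_id ++ " AND " ++ bver "k0" ++ " AND " ++ bver "e0" ++ " AND " ++ bver "k1" ++ "" ++ " WITH k1, p0") := by
    simp only [bvp_eq]
    apply String.toList_inj.mp
    simp [String.toList_append]
  have hfN : (fun (query : String) (distance : Int) => query ++ " + NODES(p" ++ PySem.Int.toStr distance ++ ")")
      = fun query distance => query ++ (" + NODES(p" ++ PySem.Int.toStr distance ++ ")") := by
    funext a b
    apply String.toList_inj.mp
    simp [String.toList_append]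
  have e1 : pyJoin ", " (pnames 1) = "p0" := by rw [pnames_one]; rfl
  have e2 : pyJoin " + " ((pnames 1).map (fun p => "NODES(" ++ p ++ ")")) = "NODES(p0)" := by
    rw [pnames_one]; rfl
  by_cases hk : k ≤ 1
  · rw [PySem.List.pyRange_one_eq_nil hk]
    simp only [List.foldl_nil]
    rw [altLoop_stop _ _ _ _ _ _ _ (by omega)]
    dsimp only
    simp only [bvp_eq]
    apply String.toList_inj.mp
    simp [String.toList_append]
  · have hk2 : k = 1 + (((k - 1).toNat : Int)) := by omega
    rw [hh, hk2]
    rw [← e1, ← e2]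
    have key := alt_inv arrow none ((k - 1).toNat) 1 (le_refl 1)
      ("MATCH p0=(k0)-[e0]-" ++ arrow ++ "(k1) WHERE ID(k0) = " ++ PySem.Int.toStr node_id ++ " AND " ++ bver "k0" ++ " AND " ++ bver "e0" ++ " AND " ++ bver "k1" ++ "" ++ " WITH k1, p0")
    dsimp only at key
    rw [key]
    dsimp only
    rw [hfN, foldl_app_str, ← final_join (1 + (((k - 1).toNat : Int))) (by omega)]
    apply String.toList_inj.mp
    simp [String.toList_append]

-- ===== VERDICT (by name: the statement is the Claim_ definition above) =====
theorem subgraph_k_spec : Claim_equal_subgraph_k := by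
  intro k node_id lm lb u _
  unfold Spec_subgraph_k subgraph_k subgraph_k_alt
  cases u <;> cases lb <;> cases lm <;> dsimp only <;>
    (first | rw [core_some] | rw [core_none]) <;>
    simp only [label_eq]
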